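-- pv_equiv track=rewrite | github.com/petercrackthecode/LeetcodePractice | time_based_key_value_store/my_slow_solution.py | custom_binary_search
-- ===== SOURCE A (Python) =====
-- from typing import List, Tuple
--
-- def custom_binary_search(time_and_val_with_key: List[Tuple[int, str]], checked_timestamp: int) -> str:
--     """
--               4
--     [1, 3, 3, 3, 8, 11, 24]
--     """
--     [left, right] = [0, len(time_and_val_with_key) - 1]
--
--     while left <= right:
--         mid = left + (right - left) // 2
--         (timestamp, val) = time_and_val_with_key[mid]
--         if timestamp == checked_timestamp:
--             return val
--         elif timestamp < checked_timestamp: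
--             if mid == right or time_and_val_with_key[mid+1][0] > checked_timestamp:
--                 return val
--             left = mid + 1
--         else:  # timestamp < checked_timestamp
--             right = mid - 1
--
--     return ""
-- ===== SOURCE B (Python) =====
-- from typing import List, Tuple
--
-- def custom_binary_search(time_and_val_with_key: List[Tuple[int, str]], checked_timestamp: int) -> str:
--     # Recursive, slice-based decomposition of the same probe sequence:
--     # each call works on a standalone sub-list instead of index bounds.
--     def search(xs: List[Tuple[int, str]]) -> str:
--         if not xs:
--             return ""
--         m = (len(xs) - 1) // 2
--         timestamp, val = xs[m]
--         if timestamp == checked_timestamp: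
--             return val
--         if timestamp < checked_timestamp:
--             if m == len(xs) - 1 or xs[m + 1][0] > checked_timestamp:
--                 return val
--             return search(xs[m + 1:])
--         return search(xs[:m])
--     return search(time_and_val_with_key)
-- ===== Notes on version B (the rewrite author's own statement) =====
-- stated objective: alternative
-- what changed: The iterative binary search over index bounds (left, right) is re-expressed as a recursion over standalone sub-lists: each step slices the list (xs[m+1:] or xs[:m]) and recurses, carrying no indices, while preserving A's exact probe sequence and early-return rules.
import Mathlib
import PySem

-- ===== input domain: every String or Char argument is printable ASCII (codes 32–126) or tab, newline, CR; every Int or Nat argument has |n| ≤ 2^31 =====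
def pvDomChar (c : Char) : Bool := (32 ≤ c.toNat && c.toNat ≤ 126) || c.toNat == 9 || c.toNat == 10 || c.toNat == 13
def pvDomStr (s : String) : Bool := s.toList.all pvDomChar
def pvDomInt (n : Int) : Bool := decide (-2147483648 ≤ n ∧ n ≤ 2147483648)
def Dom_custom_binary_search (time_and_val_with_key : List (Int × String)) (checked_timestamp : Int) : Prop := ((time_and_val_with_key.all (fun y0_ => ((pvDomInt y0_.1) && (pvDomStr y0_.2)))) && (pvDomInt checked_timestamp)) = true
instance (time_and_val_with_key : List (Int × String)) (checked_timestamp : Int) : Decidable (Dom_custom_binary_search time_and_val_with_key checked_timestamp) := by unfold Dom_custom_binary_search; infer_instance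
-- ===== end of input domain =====

-- B rewrites A's iterative binary search as a recursion over standalone sub-lists (slices)
-- instead of a loop over index bounds; objective: alternative decomposition, same probe sequence.

-- ===== PORT A =====
-- A's while-loop over the index bounds (left, right); the midpoint expression
-- `l + (r - l) // 2` is written inline at each of its occurrences.
-- The `none` branches of the index reads are unreachable (the midpoint is always in range).
def pvLoopA (xs : List (Int × String)) (c : Int) (l r : Int) : String :=
  if _h : l ≤ r then
    match PySem.List.pyGet? xs (l + PySem.Int.floordiv (r - l) 2) with
    | none => ""
    | some (t, v) =>
      if t = c then v
      else if t < c then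
        if l + PySem.Int.floordiv (r - l) 2 = r then v
        else
          match PySem.List.pyGet? xs (l + PySem.Int.floordiv (r - l) 2 + 1) with
          | none => ""
          | some p =>
            if p.1 > c then v
            else pvLoopA xs c (l + PySem.Int.floordiv (r - l) 2 + 1) r
      else pvLoopA xs c l (l + PySem.Int.floordiv (r - l) 2 - 1)
  else ""
termination_by (r + 1 - l).toNat
decreasing_by
  all_goals
    have h2 : PySem.Int.floordiv (r - l) 2 = (r - l) / 2 :=
      PySem.Int.floordiv_eq_ediv_of_pos (by norm_num)
    simp only [h2]
    omega

def custom_binary_search (time_and_val_with_key : List (Int × String)) (checked_timestamp : Int) : String :=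
  pvLoopA time_and_val_with_key checked_timestamp 0 ((time_and_val_with_key.length : Int) - 1)

-- ===== PORT B =====
-- Source B's recursive helper `search(xs)` over sub-lists; Python's in-range slices
-- xs[m+1:] and xs[:m] are ported as List.drop / List.take, the in-range reads xs[m], xs[m+1]
-- as List.getD; the index `m = (len(xs)-1)//2` is written inline at each occurrence.
def pvSearchB (c : Int) (xs : List (Int × String)) : String :=
  if xs = [] then ""
  else
    if (xs.getD ((xs.length - 1) / 2) (0, "")).1 = c then
      (xs.getD ((xs.length - 1) / 2) (0, "")).2
    else if (xs.getD ((xs.length - 1) / 2) (0, "")).1 < c then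
      if (xs.length - 1) / 2 = xs.length - 1 then
        (xs.getD ((xs.length - 1) / 2) (0, "")).2
      else if (xs.getD ((xs.length - 1) / 2 + 1) (0, "")).1 > c then
        (xs.getD ((xs.length - 1) / 2) (0, "")).2
      else pvSearchB c (xs.drop ((xs.length - 1) / 2 + 1))
    else pvSearchB c (xs.take ((xs.length - 1) / 2))
termination_by xs.length
decreasing_by
  all_goals
    simp only [List.length_drop, List.length_take]
    have : xs.length ≠ 0 := by simpa [List.length_eq_zero_iff] using ‹¬xs = []›
    omega

def custom_binary_search_alt (time_and_val_with_key : List (Int × String)) (checked_timestamp : Int) : String :=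
  pvSearchB checked_timestamp time_and_val_with_key

-- ===== PRECONDITION & SPEC =====
def Spec_custom_binary_search (time_and_val_with_key : List (Int × String)) (checked_timestamp : Int) (out : String) : Prop := out = custom_binary_search_alt time_and_val_with_key checked_timestamp
instance (time_and_val_with_key : List (Int × String)) (checked_timestamp : Int) (out : String) : Decidable (Spec_custom_binary_search time_and_val_with_key checked_timestamp out) := by unfold Spec_custom_binary_search; infer_instance

-- ===== CLAIM (what is proved, stated in full; the proofs are below) =====
def Claim_equal_custom_binary_search : Prop := ∀ (time_and_val_with_key : List (Int × String)) (checked_timestamp : Int), Dom_custom_binary_search time_and_val_with_key checked_timestamp → Spec_custom_binary_search time_and_val_with_key checked_timestamp (custom_binary_search time_and_val_with_key checked_timestamp)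

-- ===== LEMMAS AND PROOFS =====

-- The loop on the interval [l, l+n-1] computes the same value as the slice
-- recursion on the sub-list xs[l : l+n].
lemma pvLoopA_eq_searchB (c : Int) (xs : List (Int × String)) :
    ∀ n l : Nat, l + n ≤ xs.length →
      pvLoopA xs c (l : Int) ((l : Int) + (n : Int) - 1) = pvSearchB c ((xs.drop l).take n) := by
  intro n
  induction n using Nat.strong_induction_on with
  | _ n IH =>
  intro l hln
  rcases Nat.eq_zero_or_pos n with hn | hn
  · subst hn
    rw [pvLoopA, pvSearchB]
    simp
  · have hlen : ((xs.drop l).take n).length = n := by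
      simp only [List.length_take, List.length_drop]; omega
    have hne : ¬ (xs.drop l).take n = [] := by
      intro h; rw [h] at hlen; simp at hlen; omega
    have hmlt : (n-1)/2 < n := by omega
    have hidx : l + (n-1)/2 < xs.length := by omega
    have hfd : PySem.Int.floordiv ((l:Int) + n - 1 - l) 2 = (((n-1)/2 : Nat) : Int) := by
      rw [show ((l:Int) + n - 1 - l) = ((n-1 : Nat) : Int) by push_cast [Nat.cast_sub hn]; ring]
      exact_mod_cast PySem.Int.floordiv_natCast (n-1) 2
    have hget : PySem.List.pyGet? xs ((l:Int) + (((n-1)/2 : Nat) : Int)) = some xs[l + (n-1)/2] := by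
      rw [show ((l:Int) + (((n-1)/2 : Nat):Int)) = ((l + (n-1)/2 : Nat) : Int) by push_cast; ring]
      rw [PySem.List.pyGet?_natCast, List.getElem?_eq_getElem hidx]
    have hsubm : ((xs.drop l).take n).getD ((n-1)/2) (0,"") = xs[l + (n-1)/2] := by
      rw [List.getD_eq_getElem?_getD, List.getElem?_take_of_lt hmlt, List.getElem?_drop,
          List.getElem?_eq_getElem hidx]
      rfl
    rw [pvLoopA, dif_pos (by omega : (l:Int) ≤ (l:Int) + (n:Int) - 1), hfd, hget]
    rw [pvSearchB, if_neg hne]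
    rw [hlen, hsubm]
    rcases hp : xs[l + (n-1)/2] with ⟨t, v⟩
    simp only []
    by_cases h1 : t = c
    · simp [h1]
    · by_cases h2 : t < c
      · by_cases hEnd : (n-1)/2 = n - 1
        · rw [if_neg h1, if_pos h2, if_neg h1, if_pos h2, if_pos (by omega : (l:Int) + ((n-1)/2 : Nat) = (l:Int) + n - 1),
              if_pos hEnd]
        · have hm1lt : (n-1)/2 + 1 < n := by omega
          have hidx1 : l + ((n-1)/2 + 1) < xs.length := by omega
          have hget1 : PySem.List.pyGet? xs ((l:Int) + (((n-1)/2 : Nat) : Int) + 1)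
              = some xs[l + ((n-1)/2 + 1)] := by
            rw [show ((l:Int) + (((n-1)/2 : Nat):Int) + 1) = ((l + ((n-1)/2 + 1) : Nat) : Int) by
              push_cast; ring]
            rw [PySem.List.pyGet?_natCast, List.getElem?_eq_getElem hidx1]
          have hsubm1 : ((xs.drop l).take n).getD ((n-1)/2 + 1) (0,"") = xs[l + ((n-1)/2 + 1)] := by
            rw [List.getD_eq_getElem?_getD, List.getElem?_take_of_lt hm1lt, List.getElem?_drop,
                List.getElem?_eq_getElem hidx1]
            rfl
          rw [if_neg h1, if_pos h2, if_neg h1, if_pos h2,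
              if_neg (by omega : ¬ ((l:Int) + ((n-1)/2 : Nat) = (l:Int) + n - 1)),
              if_neg hEnd, hget1, hsubm1]
          simp only []
          by_cases h3 : xs[l + ((n-1)/2 + 1)].1 > c
          · simp only [if_pos h3]
          · simp only [if_neg h3]
            have e1 : List.drop ((n-1)/2 + 1) (List.take n (List.drop l xs))
                = List.take (n - ((n-1)/2 + 1)) (List.drop (l + ((n-1)/2 + 1)) xs) := by
              rw [List.drop_take, List.drop_drop]
            rw [e1]
            have hrec := IH (n - ((n-1)/2 + 1)) (by omega) (l + ((n-1)/2 + 1)) (by omega)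
            rw [show ((l:Int) + (((n-1)/2 : Nat):Int) + 1) = ((l + ((n-1)/2 + 1) : Nat) : Int) by
                  push_cast; ring,
                show ((l:Int) + (n:Int) - 1)
                    = ((l + ((n-1)/2 + 1) : Nat):Int) + ((n - ((n-1)/2 + 1) : Nat):Int) - 1 by
                  push_cast [Nat.cast_sub hm1lt.le]; ring]
            exact hrec
      · rw [if_neg h1, if_neg h2, if_neg h1, if_neg h2]
        rw [List.take_take, min_eq_left hmlt.le]
        have hrec := IH ((n-1)/2) hmlt l (by omega)
        exact hrec

-- ===== VERDICT (by name: the statement is the Claim_ definition above) =====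
theorem custom_binary_search_spec : Claim_equal_custom_binary_search := by
  intro xs c _
  unfold Spec_custom_binary_search custom_binary_search custom_binary_search_alt
  have h := pvLoopA_eq_searchB c xs xs.length 0 (by omega)
  simpa using h
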